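-- pv_equiv track=rewrite | github.com/DanielDPW/Praktikum-Daspro-IF1210 | Praktikum-6/1/main.py | turn_to_array
-- ===== SOURCE A (Python) =====
-- def turn_to_array(str):
--     x = ''
--     y = []
--     num = ['0','1','2','3','4','5','6','7','8','9','-']
--     for char in str:
--         if char in num and not '':
--             x = x + char
--         else:
--             y.append(x)
--             x = ''
--     if x:
--         y.append(x)
--     return y
-- ===== SOURCE B (Python) =====
-- def turn_to_array(str):
--     # Two-pointer slicing: record the start of the current numeric run and cut
--     # slices at separators, instead of accumulating characters one by one.
--     parts = []
--     start = 0
--     for i, ch in enumerate(str):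
--         if ch not in '0123456789-':
--             parts.append(str[start:i])
--             start = i + 1
--     if start < len(str):
--         parts.append(str[start:])
--     return parts
-- ===== Notes on version B (the rewrite author's own statement) =====
-- stated objective: alternative
-- what changed: Replaces A's per-character string accumulation (growing x by concatenation and resetting it) with a two-pointer scheme that remembers the start index of the current numeric run and appends whole slices str[start:i] at separators, plus one final slice; slicing avoids the repeated-concatenation cost on long numeric runs.
import Mathlib
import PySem

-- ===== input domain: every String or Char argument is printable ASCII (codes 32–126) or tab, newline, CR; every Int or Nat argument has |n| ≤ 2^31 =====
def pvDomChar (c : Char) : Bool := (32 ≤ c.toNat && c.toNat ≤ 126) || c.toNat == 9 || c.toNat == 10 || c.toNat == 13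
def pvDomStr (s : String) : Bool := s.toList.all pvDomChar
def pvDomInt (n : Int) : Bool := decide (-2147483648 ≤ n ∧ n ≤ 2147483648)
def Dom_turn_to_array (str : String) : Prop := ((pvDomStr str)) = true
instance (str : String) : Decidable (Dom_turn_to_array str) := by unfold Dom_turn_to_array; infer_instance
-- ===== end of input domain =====

-- B replaces A's character-by-character accumulator with a two-pointer scheme
-- appending whole slices at separators; same return value on every input.

-- ===== PORT A =====
-- the literal list 'num' of A (shared: B's membership test 'ch not in "0123456789-"' checks the same characters)
def pvNum : List Char := ['0','1','2','3','4','5','6','7','8','9','-']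

-- A's loop body: state (x, y); 'char in num and not '''' — "not ''" is constantly True in Python
def pvAStep (xy : List Char × List String) (c : Char) : List Char × List String :=
  if pvNum.contains c then (xy.1 ++ [c], xy.2) else ([], xy.2 ++ [String.ofList xy.1])

def turn_to_array (str : String) : List String :=
  let r := str.toList.foldl pvAStep ([], [])
  if r.1 = [] then r.2 else r.2 ++ [String.ofList r.1]

-- ===== PORT B =====
-- B's loop body over enumerate(str): state (parts, start); appends the slice str[start:i] at a separator
def pvBStep (cs : List Char) (ps : List String × Int) (ic : Int × Char) : List String × Int :=
  if ¬ pvNum.contains ic.2 then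
    (ps.1 ++ [String.ofList (PySem.List.slice cs (some ps.2) (some ic.1))], ic.1 + 1)
  else ps

def turn_to_array_alt (str : String) : List String :=
  let cs := str.toList
  let r := (PySem.List.enumerate cs 0).foldl (pvBStep cs) ([], 0)
  if r.2 < (cs.length : Int) then r.1 ++ [String.ofList (PySem.List.slice cs (some r.2) none)] else r.1

-- ===== PRECONDITION & SPEC =====
def Spec_turn_to_array (str : String) (out : List String) : Prop := out = turn_to_array_alt str
instance (str : String) (out : List String) : Decidable (Spec_turn_to_array str out) := by unfold Spec_turn_to_array; infer_instance

-- ===== CLAIM (what is proved, stated in full; the proofs are below) =====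
def Claim_equal_turn_to_array : Prop := ∀ (str : String), Dom_turn_to_array str → Spec_turn_to_array str (turn_to_array str)

-- ===== LEMMAS AND PROOFS =====

-- A's accumulator after processing full.take i, having last reset at index start,
-- is the slice (full.drop start).take (i - start); both finishes then agree.
lemma pv_key (full : List Char) : ∀ (tail : List Char) (i start : Nat) (y : List String),
    tail = full.drop i → start ≤ i →
    (let r := tail.foldl pvAStep ((full.drop start).take (i - start), y);
     if r.1 = [] then r.2 else r.2 ++ [String.ofList r.1])
    = (let r := (PySem.List.enumerate tail (i : Int)).foldl (pvBStep full) (y, (start : Int));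
       if r.2 < (full.length : Int) then r.1 ++ [String.ofList (PySem.List.slice full (some r.2) none)] else r.1) := by
  intro tail
  induction tail with
  | nil =>
    intro i start y htail hsi
    have hlen : full.length ≤ i := by
      have := List.drop_eq_nil_iff.mp htail.symm
      omega
    have hx : (full.drop start).take (i - start) = full.drop start := by
      apply List.take_of_length_le
      simp
      omega
    simp only [PySem.List.enumerate_nil, List.foldl_nil, hx]
    rw [PySem.List.slice_from_natCast]
    have hdrop : full.drop start = [] ↔ full.length ≤ start := List.drop_eq_nil_iff
    by_cases hse : full.length ≤ start
    · have : full.drop start = [] := hdrop.mpr hse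
      simp [this]
      omega
    · have : ¬ full.drop start = [] := fun h => hse (hdrop.mp h)
      simp [this]
      omega
  | cons c rest ih =>
    intro i start y htail hsi
    have hi : i < full.length := by
      by_contra h
      have : full.drop i = [] := List.drop_eq_nil_iff.mpr (by omega)
      rw [this] at htail
      exact absurd htail (by simp)
    have hrest : rest = full.drop (i + 1) := by
      have := congrArg List.tail htail
      simpa [List.tail_drop] using this
    have hci : full[i]? = some c := by
      have h0 : (full.drop i)[0]? = some c := by rw [← htail]; rfl
      rw [List.getElem?_drop] at h0
      simpa using h0
    have hxsucc : (full.drop start).take (i + 1 - start)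
        = (full.drop start).take (i - start) ++ [c] := by
      have h1 : i + 1 - start = (i - start) + 1 := by omega
      rw [h1, List.take_add_one, List.getElem?_drop]
      have h2 : start + (i - start) = i := by omega
      rw [h2, hci]
      rfl
    rw [PySem.List.enumerate_cons]
    by_cases hc : pvNum.contains c
    · -- numeric character: A extends x, B leaves (parts, start) unchanged
      simp only [List.foldl_cons, pvAStep, pvBStep, hc, if_pos, not_true]
      simp only [← hxsucc]
      have := ih (i + 1) start y hrest (by omega)
      push_cast at this ⊢
      exact this
    · -- separator: A appends x and resets, B appends the slice and moves start
      simp only [List.foldl_cons, pvAStep, pvBStep, hc]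
      have hsl : PySem.List.slice full (some (start : Int)) (some (i : Int))
          = (full.drop start).take (i - start) := PySem.List.slice_natCast full start i
      have hz : ((full.drop (i + 1)).take ((i + 1) - (i + 1)) : List Char) = [] := by simp
      have := ih (i + 1) (i + 1) (y ++ [String.ofList ((full.drop start).take (i - start))]) hrest (le_refl _)
      rw [hz] at this
      rw [hsl]
      push_cast at this ⊢
      exact this

-- ===== VERDICT (by name: the statement is the Claim_ definition above) =====
theorem turn_to_array_spec : Claim_equal_turn_to_array := by
  intro str _
  unfold Spec_turn_to_array turn_to_array turn_to_array_alt
  have h := pv_key str.toList str.toList 0 0 [] (by simp) (le_refl _)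
  simpa using h
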